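-- pv_equiv track=rewrite | github.com/Dixith-ai/Learning-Python | files/_staging/algorithms/bfs_graph.py | bfs_level_order
-- ===== SOURCE A (Python) =====
-- from collections import deque
--
-- def bfs_level_order(graph, start):
--     visited = set()
--     queue = deque([(start, 0)])
--     levels = {}
--
--     while queue:
--         vertex, level = queue.popleft()
--
--         if vertex not in visited:
--             visited.add(vertex)
--             levels[vertex] = level
--
--             for neighbor in graph[vertex]:
--                 if neighbor not in visited:
--                     queue.append((neighbor, level + 1))
--
--     return levels
--
-- graph = {
--     0: [1, 2],
--     1: [0, 3, 4],
--     2: [0, 5],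
--     3: [1],
--     4: [1],
--     5: [2]
-- }
--
-- levels = bfs_level_order(graph, 0)
-- ===== SOURCE B (Python) =====
-- def bfs_level_order(graph, start):
--     levels = {}
--     frontier = [start]
--     level = 0
--     while frontier:
--         fresh = []
--         for v in frontier:
--             if v not in levels:
--                 levels[v] = level
--                 fresh.append(graph[v])
--         frontier = [n for ns in fresh for n in ns if n not in levels]
--         level += 1
--     return levels
-- ===== Notes on version B (the rewrite author's own statement) =====
-- stated objective: alternative
-- what changed: Replaces the deque of (vertex, level) pairs and the separate visited set by staged level-synchronous passes: per level, one pass marks unseen frontier vertices in the levels dict (which doubles as the visited set) and collects their adjacency lists, then a flat comprehension over those lists builds the next frontier; no levels travel in a queue and no auxiliary set exists.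
import Mathlib
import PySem

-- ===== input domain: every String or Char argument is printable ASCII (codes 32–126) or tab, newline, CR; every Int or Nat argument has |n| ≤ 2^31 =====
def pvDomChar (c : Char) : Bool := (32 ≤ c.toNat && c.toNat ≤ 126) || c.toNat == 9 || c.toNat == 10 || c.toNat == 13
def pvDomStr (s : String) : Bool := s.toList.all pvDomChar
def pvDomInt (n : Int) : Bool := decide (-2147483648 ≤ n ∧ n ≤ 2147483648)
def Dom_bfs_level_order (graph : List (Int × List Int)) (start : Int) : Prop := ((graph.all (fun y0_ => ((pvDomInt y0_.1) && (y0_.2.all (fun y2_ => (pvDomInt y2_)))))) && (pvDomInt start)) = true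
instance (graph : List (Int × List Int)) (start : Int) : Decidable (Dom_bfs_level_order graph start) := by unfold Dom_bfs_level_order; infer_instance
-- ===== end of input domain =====

-- B replaces A's deque of (vertex, level) pairs and visited set by staged level-synchronous
-- passes (mark pass into the levels dict, then an expansion comprehension); same cost,
-- genuinely different decomposition. Return value only; neither side mutates its arguments.

-- number of list elements not satisfying a contains predicate (termination measure)
def unvisCount (keys : List Int) (visited : PySem.Set Int) : Nat :=
  (keys.filter (fun k => !PySem.Set.contains visited k)).length

def unvisCountD (keys : List Int) (levels : PySem.Dict Int Int) : Nat :=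
  (keys.filter (fun k => !(levels.contains k))).length

theorem filter_length_le_of_imp {l : List Int} {p q : Int → Bool}
    (h : ∀ x, p x = true → q x = true) : (l.filter p).length ≤ (l.filter q).length := by
  induction l with
  | nil => simp
  | cons x xs ih =>
    rw [List.filter_cons, List.filter_cons]
    cases hp : p x with
    | true => rw [h x hp]; simpa using ih
    | false =>
      cases hq : q x with
      | true => simp; omega
      | false => simpa using ih

theorem filter_length_lt {l : List Int} {p q : Int → Bool}
    (h : ∀ x, p x = true → q x = true) {v : Int} (hv : v ∈ l)
    (hp : p v = false) (hq : q v = true) :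
    (l.filter p).length < (l.filter q).length := by
  induction l with
  | nil => cases hv
  | cons x xs ih =>
    rw [List.filter_cons, List.filter_cons]
    by_cases hx : x = v
    · subst hx
      rw [hp, hq]
      have := filter_length_le_of_imp (l := xs) h
      simp; omega
    · have hv' : v ∈ xs := by
        rcases List.mem_cons.mp hv with h1 | h1
        · exact absurd h1.symm hx
        · exact h1
      have hlt := ih hv'
      cases hpx : p x with
      | true => rw [h x hpx]; simpa using hlt
      | false =>
        cases hqx : q x with
        | true => simp; omega
        | false => simpa using hlt

theorem contains_add_imp (visited : PySem.Set Int) (v x : Int)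
    (h : (!PySem.Set.contains (PySem.Set.add visited v) x) = true) :
    (!PySem.Set.contains visited x) = true := by
  simp only [Bool.not_eq_eq_eq_not, Bool.not_true] at h ⊢
  by_contra h2
  have hm := (PySem.Set.contains_iff visited x).mp (eq_true_of_ne_false h2)
  have : PySem.Set.contains (PySem.Set.add visited v) x = true :=
    (PySem.Set.contains_iff _ _).mpr ((PySem.Set.mem_add _ _ _).mpr (Or.inl hm))
  rw [this] at h; cases h

theorem unvisCount_add_lt (keys : List Int) (visited : PySem.Set Int) (v : Int)
    (hv : v ∈ keys) (hnv : PySem.Set.contains visited v = false) :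
    unvisCount keys (PySem.Set.add visited v) < unvisCount keys visited := by
  apply filter_length_lt (contains_add_imp visited v) hv
  · show (!PySem.Set.contains (PySem.Set.add visited v) v) = false
    have : PySem.Set.contains (PySem.Set.add visited v) v = true :=
      (PySem.Set.contains_iff _ _).mpr ((PySem.Set.mem_add _ _ _).mpr (Or.inr rfl))
    rw [this]; rfl
  · show (!PySem.Set.contains visited v) = true
    rw [hnv]; rfl

theorem containsD_insert_imp (levels : PySem.Dict Int Int) (v L x : Int)
    (h : (!(levels.insert v L).contains x) = true) : (!(levels.contains x)) = true := by
  rw [PySem.Dict.contains_insert] at h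
  simp only [Bool.not_eq_eq_eq_not, Bool.not_true, Bool.or_eq_false_iff] at h
  simp [h.2]

theorem unvisCountD_insert_lt (keys : List Int) (levels : PySem.Dict Int Int) (v L : Int)
    (hv : v ∈ keys) (hnv : levels.contains v = false) :
    unvisCountD keys (levels.insert v L) < unvisCountD keys levels := by
  apply filter_length_lt (containsD_insert_imp levels v L) hv
  · show (!(levels.insert v L).contains v) = false
    rw [PySem.Dict.contains_insert]
    simp
  · show (!(levels.contains v)) = true
    rw [hnv]; rfl

-- ===== PORT A =====
-- A's while-loop over the deque of (vertex, level) pairs, with its separate visited set.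
def bfsALoop (graph : PySem.Dict Int (List Int)) (visited : PySem.Set Int)
    (queue : List (Int × Int)) (levels : PySem.Dict Int Int) : PySem.Dict Int Int :=
  match queue with
  | [] => levels
  | (vertex, level) :: rest =>
    if PySem.Set.contains visited vertex then
      bfsALoop graph visited rest levels
    else
      let visited' := PySem.Set.add visited vertex
      let levels' := levels.insert vertex level
      match h : graph.get? vertex with
      | none => levels'  -- Python raises KeyError here (excluded by Pre_)
      | some ns =>
        bfsALoop graph visited'
          (rest ++ (ns.filter (fun n => !PySem.Set.contains visited' n)).map (fun n => (n, level + 1)))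
          levels'
termination_by (unvisCount graph.keys visited, queue.length)
decreasing_by
  · apply Prod.Lex.right; simp
  · apply Prod.Lex.left
    apply unvisCount_add_lt
    · have hc : graph.contains vertex = true := by
        rw [PySem.Dict.contains_eq_isSome_get?, h]; rfl
      exact (PySem.Dict.contains_iff_mem_keys _ _).mp hc
    · simpa using ‹¬ PySem.Set.contains visited vertex = true›

def bfs_level_order (graph : List (Int × List Int)) (start : Int) : List (Int × Int) :=
  (bfsALoop (PySem.Dict.ofList graph) PySem.Set.empty [(start, 0)] PySem.Dict.empty).items

-- ===== PORT B =====
-- B's mark pass: 'for v in frontier: if v not in levels: levels[v] = level; fresh.append(graph[v])'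
def bMark (graph : PySem.Dict Int (List Int)) (levels : PySem.Dict Int Int)
    (frontier : List Int) (level : Int) (fresh : List (List Int)) :
    PySem.Dict Int Int × List (List Int) × Bool :=
  match frontier with
  | [] => (levels, fresh, false)
  | v :: vs =>
    if levels.contains v then bMark graph levels vs level fresh
    else
      let levels' := levels.insert v level
      match graph.get? v with
      | none => (levels', fresh, true)  -- Python raises KeyError at graph[v] (excluded by Pre_)
      | some ns => bMark graph levels' vs level (fresh ++ [ns])

-- the comprehension '[n for ns in fresh for n in ns if n not in levels]'
def bExpand (levels : PySem.Dict Int Int) (fresh : List (List Int)) : List Int :=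
  fresh.flatMap (fun ns => ns.filter (fun n => !(levels.contains n)))

theorem bMark_progress (graph : PySem.Dict Int (List Int)) (frontier : List Int) :
    ∀ (levels : PySem.Dict Int Int) (level : Int) (fresh : List (List Int)),
    (bMark graph levels frontier level fresh).2.2 = false →
    unvisCountD graph.keys (bMark graph levels frontier level fresh).1 < unvisCountD graph.keys levels
      ∨ ((bMark graph levels frontier level fresh).1 = levels
          ∧ (bMark graph levels frontier level fresh).2.1 = fresh) := by
  induction frontier with
  | nil => intro levels level fresh _; exact Or.inr ⟨rfl, rfl⟩
  | cons v vs ih =>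
    intro levels level fresh hr
    by_cases hc : levels.contains v = true
    · simp only [bMark, hc, if_true] at hr ⊢; exact ih levels level fresh hr
    · simp only [bMark, hc, if_false, Bool.false_eq_true] at hr ⊢
      cases hg : graph.get? v with
      | none => simp [hg] at hr
      | some ns =>
        simp only [hg] at hr ⊢
        have hlt : unvisCountD graph.keys (levels.insert v level) < unvisCountD graph.keys levels := by
          apply unvisCountD_insert_lt
          · have hcont : graph.contains v = true := by
              rw [PySem.Dict.contains_eq_isSome_get?, hg]; rfl
            exact (PySem.Dict.contains_iff_mem_keys _ _).mp hcont
          · simpa using hc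
        rcases ih (levels.insert v level) level (fresh ++ [ns]) hr with h | ⟨h1, _⟩
        · exact Or.inl (lt_trans h hlt)
        · exact Or.inl (by rw [h1]; exact hlt)

-- B's outer while-loop: one mark pass, then the expansion comprehension, per level
def bLoop (graph : PySem.Dict Int (List Int)) (levels : PySem.Dict Int Int)
    (frontier : List Int) (level : Int) : PySem.Dict Int Int :=
  if hf : frontier = [] then levels
  else
    let r := bMark graph levels frontier level []
    if r.2.2 = true then r.1
    else bLoop graph r.1 (bExpand r.1 r.2.1) (level + 1)
termination_by (unvisCountD graph.keys levels, frontier.length)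
decreasing_by
  rename_i hr
  simp only [Bool.not_eq_true] at hr
  rcases bMark_progress graph frontier levels level [] hr with h | ⟨h1, h2⟩
  · exact Prod.Lex.left _ _ h
  · rw [h1, h2]
    show Prod.Lex _ _ (unvisCountD graph.keys levels, (bExpand levels []).length) _
    apply Prod.Lex.right
    show (bExpand levels []).length < frontier.length
    simp [bExpand, List.length_pos_iff]
    exact hf

def bfs_level_order_alt (graph : List (Int × List Int)) (start : Int) : List (Int × Int) :=
  (bLoop (PySem.Dict.ofList graph) PySem.Dict.empty [start] 0).items

-- ===== PRECONDITION & SPEC =====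
-- vertices within graph.length+1 neighbour-expansion steps of start (a superset marker for the
-- reachable set; distances are bounded by the number of keys, so the iteration is saturated)
def pvReach (graph : List (Int × List Int)) (start : Int) : List Int :=
  (fun S => PySem.Set.update S
      (S.flatMap (fun v => (((PySem.Dict.ofList graph).get? v).getD []))))^[graph.length + 1] [start]

-- Pre_ holds exactly when start and every vertex reachable from it is a key of the dict;
-- on all other inputs A raises KeyError at the first reached non-key vertex.
def Pre_bfs_level_order (graph : List (Int × List Int)) (start : Int) : Prop :=
  start ∈ graph.map Prod.fst ∧ ∀ v ∈ pvReach graph start, v ∈ graph.map Prod.fst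
instance (graph : List (Int × List Int)) (start : Int) : Decidable (Pre_bfs_level_order graph start) := by
  unfold Pre_bfs_level_order; infer_instance

def pvWitness_bfs_level_order : (List (Int × List Int)) × Int := ([(0, [1, 2]), (1, [0]), (2, [])], 0)

def Spec_bfs_level_order (graph : List (Int × List Int)) (start : Int) (out : List (Int × Int)) : Prop := out = bfs_level_order_alt graph start
instance (graph : List (Int × List Int)) (start : Int) (out : List (Int × Int)) : Decidable (Spec_bfs_level_order graph start out) := by unfold Spec_bfs_level_order; infer_instance

-- ===== CLAIM (what is proved, stated in full; the proofs are below) =====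
def Claim_equal_bfs_level_order : Prop := ∀ (graph : List (Int × List Int)) (start : Int), Dom_bfs_level_order graph start → Pre_bfs_level_order graph start → Spec_bfs_level_order graph start (bfs_level_order graph start)

-- ===== LEMMAS AND PROOFS =====

-- Step 1 (proof-side): interleaved level-synchronous loop with A's visited set (sLevel/sLoop);
-- A simulates it level by level (level_sim / loop_sim).
def sLevel (graph : PySem.Dict Int (List Int)) (frontier : List Int)
    (visited : PySem.Set Int) (levels : PySem.Dict Int Int) (next : List Int) (level : Int) :
    PySem.Set Int × PySem.Dict Int Int × List Int × Bool :=
  match frontier with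
  | [] => (visited, levels, next, false)
  | vertex :: vs =>
    if PySem.Set.contains visited vertex then
      sLevel graph vs visited levels next level
    else
      let visited' := PySem.Set.add visited vertex
      let levels' := levels.insert vertex level
      match graph.get? vertex with
      | none => (visited', levels', next, true)
      | some ns =>
        sLevel graph vs visited' levels'
          (next ++ ns.filter (fun n => !PySem.Set.contains visited' n)) level

theorem sLevel_progress (graph : PySem.Dict Int (List Int)) (fs : List Int)
    (visited : PySem.Set Int) (levels : PySem.Dict Int Int) (next : List Int) (level : Int) :
    (sLevel graph fs visited levels next level).2.2.2 = false →
    unvisCount graph.keys (sLevel graph fs visited levels next level).1 < unvisCount graph.keys visited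
      ∨ ((sLevel graph fs visited levels next level).1 = visited
          ∧ (sLevel graph fs visited levels next level).2.2.1 = next) := by
  induction fs generalizing visited levels next with
  | nil => intro _; exact Or.inr ⟨rfl, rfl⟩
  | cons v vs ih =>
    intro hr
    by_cases hc : PySem.Set.contains visited v = true
    · simp only [sLevel, hc, if_true] at hr ⊢; exact ih visited levels next hr
    · simp only [sLevel, hc, if_false, Bool.false_eq_true] at hr ⊢
      cases hg : graph.get? v with
      | none => simp [hg] at hr
      | some ns =>
        simp only [hg] at hr ⊢
        have hlt : unvisCount graph.keys (PySem.Set.add visited v) < unvisCount graph.keys visited := by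
          apply unvisCount_add_lt
          · have hcont : graph.contains v = true := by
              rw [PySem.Dict.contains_eq_isSome_get?, hg]; rfl
            exact (PySem.Dict.contains_iff_mem_keys _ _).mp hcont
          · simpa using hc
        rcases ih (PySem.Set.add visited v) (levels.insert v level)
            (next ++ ns.filter (fun n => !PySem.Set.contains (PySem.Set.add visited v) n)) hr with h | ⟨h1, _⟩
        · exact Or.inl (lt_trans h hlt)
        · exact Or.inl (by rw [h1]; exact hlt)

def sLoop (graph : PySem.Dict Int (List Int)) (visited : PySem.Set Int)
    (levels : PySem.Dict Int Int) (frontier : List Int) (level : Int) : PySem.Dict Int Int :=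
  if hf : frontier = [] then levels
  else
    let r := sLevel graph frontier visited levels [] level
    if r.2.2.2 = true then r.2.1
    else sLoop graph r.1 r.2.1 r.2.2.1 (level + 1)
termination_by (unvisCount graph.keys visited, frontier.length)
decreasing_by
  rename_i hr
  simp only [Bool.not_eq_true] at hr
  rcases sLevel_progress graph frontier visited levels [] level hr with h | ⟨h1, h2⟩
  · exact Prod.Lex.left _ _ h
  · rw [h1, h2]
    apply Prod.Lex.right
    simp [List.length_pos_iff]
    exact hf

theorem level_sim (graph : PySem.Dict Int (List Int)) (f : List Int) :
    ∀ (g : List Int) (visited : PySem.Set Int) (levels : PySem.Dict Int Int) (L : Int),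
    bfsALoop graph visited (f.map (fun v => (v, L)) ++ g.map (fun v => (v, L + 1))) levels
      = (let r := sLevel graph f visited levels g L;
         if r.2.2.2 = true then r.2.1
         else bfsALoop graph r.1 (r.2.2.1.map (fun v => (v, L + 1))) r.2.1) := by
  induction f with
  | nil => intro g visited levels L; simp [sLevel]
  | cons v vs ih =>
    intro g visited levels L
    by_cases hc : PySem.Set.contains visited v = true
    · simp only [List.map_cons, List.cons_append]
      rw [bfsALoop]
      simp only [hc, if_true]
      rw [ih g visited levels L]
      simp only [sLevel, hc, if_true]
    · simp only [List.map_cons, List.cons_append]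
      rw [bfsALoop]
      simp only [hc, if_false, Bool.false_eq_true]
      cases hg : graph.get? v with
      | none =>
        simp only [sLevel, hc, hg, if_false, Bool.false_eq_true]
        simp
      | some ns =>
        simp only [sLevel, hc, hg, if_false, Bool.false_eq_true]
        rw [List.append_assoc, ← List.map_append]
        exact ih (g ++ ns.filter (fun n => !PySem.Set.contains (PySem.Set.add visited v) n))
          (PySem.Set.add visited v) (levels.insert v L) L

theorem loop_sim (graph : PySem.Dict Int (List Int)) (visited : PySem.Set Int)
    (levels : PySem.Dict Int Int) (frontier : List Int) (level : Int) :
    bfsALoop graph visited (frontier.map (fun v => (v, level))) levels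
      = sLoop graph visited levels frontier level := by
  induction visited, levels, frontier, level using sLoop.induct graph with
  | case1 visited levels level => rw [sLoop]; simp [bfsALoop]
  | case2 visited levels frontier level hf r hr =>
    have hr' : (sLevel graph frontier visited levels [] level).2.2.2 = true := hr
    have h := level_sim graph frontier [] visited levels level
    simp only [List.map_nil, List.append_nil] at h
    rw [h, sLoop]
    simp [hf, hr']
  | case3 visited levels frontier level hf r hr ih =>
    have hr' : (sLevel graph frontier visited levels [] level).2.2.2 = false := by
      simpa using hr
    have ih' : bfsALoop graph (sLevel graph frontier visited levels [] level).1
        (List.map (fun v => (v, level + 1)) (sLevel graph frontier visited levels [] level).2.2.1)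
        (sLevel graph frontier visited levels [] level).2.1
      = sLoop graph (sLevel graph frontier visited levels [] level).1
        (sLevel graph frontier visited levels [] level).2.1
        (sLevel graph frontier visited levels [] level).2.2.1 (level + 1) := ih
    have h := level_sim graph frontier [] visited levels level
    simp only [List.map_nil, List.append_nil] at h
    rw [h, sLoop]
    simp [hf, hr', ih']

-- Step 2 (proof-side): the same interleaved loop with the levels dict doubling as the
-- visited set (cLevel/cLoop); sLoop = cLoop under the invariant visited ≡ levels.keys.
def cLevel (graph : PySem.Dict Int (List Int)) (frontier : List Int)
    (levels : PySem.Dict Int Int) (next : List Int) (level : Int) :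
    PySem.Dict Int Int × List Int × Bool :=
  match frontier with
  | [] => (levels, next, false)
  | vertex :: vs =>
    if levels.contains vertex then
      cLevel graph vs levels next level
    else
      let levels' := levels.insert vertex level
      match graph.get? vertex with
      | none => (levels', next, true)
      | some ns =>
        cLevel graph vs levels'
          (next ++ ns.filter (fun n => !(levels'.contains n))) level

theorem cLevel_progress (graph : PySem.Dict Int (List Int)) (fs : List Int)
    (levels : PySem.Dict Int Int) (next : List Int) (level : Int) :
    (cLevel graph fs levels next level).2.2 = false →
    unvisCountD graph.keys (cLevel graph fs levels next level).1 < unvisCountD graph.keys levels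
      ∨ ((cLevel graph fs levels next level).1 = levels
          ∧ (cLevel graph fs levels next level).2.1 = next) := by
  induction fs generalizing levels next with
  | nil => intro _; exact Or.inr ⟨rfl, rfl⟩
  | cons v vs ih =>
    intro hr
    by_cases hc : levels.contains v = true
    · simp only [cLevel, hc, if_true] at hr ⊢; exact ih levels next hr
    · simp only [cLevel, hc, if_false, Bool.false_eq_true] at hr ⊢
      cases hg : graph.get? v with
      | none => simp [hg] at hr
      | some ns =>
        simp only [hg] at hr ⊢
        have hlt : unvisCountD graph.keys (levels.insert v level) < unvisCountD graph.keys levels := by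
          apply unvisCountD_insert_lt
          · have hcont : graph.contains v = true := by
              rw [PySem.Dict.contains_eq_isSome_get?, hg]; rfl
            exact (PySem.Dict.contains_iff_mem_keys _ _).mp hcont
          · simpa using hc
        rcases ih (levels.insert v level)
            (next ++ ns.filter (fun n => !((levels.insert v level).contains n))) hr with h | ⟨h1, _⟩
        · exact Or.inl (lt_trans h hlt)
        · exact Or.inl (by rw [h1]; exact hlt)

def cLoop (graph : PySem.Dict Int (List Int)) (levels : PySem.Dict Int Int)
    (frontier : List Int) (level : Int) : PySem.Dict Int Int :=
  if hf : frontier = [] then levels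
  else
    let r := cLevel graph frontier levels [] level
    if r.2.2 = true then r.1
    else cLoop graph r.1 r.2.1 (level + 1)
termination_by (unvisCountD graph.keys levels, frontier.length)
decreasing_by
  rename_i hr
  simp only [Bool.not_eq_true] at hr
  rcases cLevel_progress graph frontier levels [] level hr with h | ⟨h1, h2⟩
  · exact Prod.Lex.left _ _ h
  · rw [h1, h2]
    apply Prod.Lex.right
    simp [List.length_pos_iff]
    exact hf

theorem set_contains_add (s : PySem.Set Int) (v x : Int) :
    PySem.Set.contains (PySem.Set.add s v) x = (x == v || PySem.Set.contains s x) := by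
  by_cases h : x ∈ PySem.Set.add s v
  · rw [(PySem.Set.contains_iff _ _).mpr h]
    rcases (PySem.Set.mem_add s v x).mp h with hs | hv
    · rw [(PySem.Set.contains_iff s x).mpr hs]; simp
    · subst hv; simp
  · have h1 : PySem.Set.contains (PySem.Set.add s v) x = false := by
      by_contra hc
      exact h ((PySem.Set.contains_iff _ _).mp (eq_true_of_ne_false hc))
    have h2 : PySem.Set.contains s x = false := by
      by_contra hc
      exact h ((PySem.Set.mem_add s v x).mpr
        (Or.inl ((PySem.Set.contains_iff s x).mp (eq_true_of_ne_false hc))))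
    have h3 : (x == v) = false := by
      simp only [beq_eq_false_iff_ne, ne_eq]
      intro he; exact h ((PySem.Set.mem_add s v x).mpr (Or.inr he))
    rw [h1, h2, h3]; rfl

theorem sc_level (graph : PySem.Dict Int (List Int)) (f : List Int) :
    ∀ (visited : PySem.Set Int) (levels : PySem.Dict Int Int) (next : List Int) (L : Int),
    (∀ x : Int, PySem.Set.contains visited x = levels.contains x) →
    (sLevel graph f visited levels next L).2 = cLevel graph f levels next L
      ∧ ∀ x : Int, PySem.Set.contains (sLevel graph f visited levels next L).1 x
          = (sLevel graph f visited levels next L).2.1.contains x := by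
  induction f with
  | nil =>
    intro visited levels next L hinv
    exact ⟨rfl, hinv⟩
  | cons v vs ih =>
    intro visited levels next L hinv
    by_cases hc : PySem.Set.contains visited v = true
    · have hc' : levels.contains v = true := by rw [← hinv]; exact hc
      simp only [sLevel, cLevel, hc, hc', if_true]
      exact ih visited levels next L hinv
    · have hc' : ¬ levels.contains v = true := by rw [← hinv]; exact hc
      have hinv' : ∀ x : Int, PySem.Set.contains (PySem.Set.add visited v) x
          = (levels.insert v L).contains x := by
        intro x
        rw [set_contains_add, PySem.Dict.contains_insert, hinv x]
      cases hg : graph.get? v with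
      | none =>
        simp only [sLevel, cLevel, hc, hc', hg, if_false, Bool.false_eq_true]
        exact ⟨trivial, hinv'⟩
      | some ns =>
        simp only [sLevel, cLevel, hc, hc', hg, if_false, Bool.false_eq_true]
        have hfeq : ns.filter (fun n => !PySem.Set.contains (PySem.Set.add visited v) n)
            = ns.filter (fun n => !((levels.insert v L).contains n)) :=
          List.filter_congr (fun x _ => by rw [hinv' x])
        rw [hfeq]
        exact ih (PySem.Set.add visited v) (levels.insert v L)
          (next ++ ns.filter (fun n => !((levels.insert v L).contains n))) L hinv'

theorem sc_loop (graph : PySem.Dict Int (List Int)) (visited : PySem.Set Int)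
    (levels : PySem.Dict Int Int) (frontier : List Int) (level : Int) :
    (∀ x : Int, PySem.Set.contains visited x = levels.contains x) →
    sLoop graph visited levels frontier level = cLoop graph levels frontier level := by
  induction visited, levels, frontier, level using sLoop.induct graph with
  | case1 visited levels level =>
    intro _
    rw [sLoop, cLoop]
    simp
  | case2 visited levels frontier level hf r hr =>
    intro hinv
    obtain ⟨he, _⟩ := sc_level graph frontier visited levels [] level hinv
    have hc2 : (cLevel graph frontier levels [] level).2.2 = true := by
      rw [← he]; exact hr
    have hc1 : (cLevel graph frontier levels [] level).1
        = (sLevel graph frontier visited levels [] level).2.1 := by rw [← he]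
    rw [sLoop, cLoop]
    simp [hf, hc2, hc1]
    intro hx
    have hrt : (sLevel graph frontier visited levels [] level).2.2.2 = true := hr
    rw [hx] at hrt
    exact Bool.noConfusion hrt
  | case3 visited levels frontier level hf r hr ih =>
    intro hinv
    obtain ⟨he, hinv'⟩ := sc_level graph frontier visited levels [] level hinv
    have hr' : (sLevel graph frontier visited levels [] level).2.2.2 = false := by
      simpa using hr
    have hc2 : (cLevel graph frontier levels [] level).2.2 = false := by
      rw [← he]; exact hr'
    have hc1 : (cLevel graph frontier levels [] level).1
        = (sLevel graph frontier visited levels [] level).2.1 := by rw [← he]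
    have hcn : (cLevel graph frontier levels [] level).2.1
        = (sLevel graph frontier visited levels [] level).2.2.1 := by rw [← he]
    have hinv'' : ∀ x : Int, PySem.Set.contains (sLevel graph frontier visited levels [] level).1 x
        = (sLevel graph frontier visited levels [] level).2.1.contains x := hinv'
    have ih' := ih hinv''
    rw [sLoop, cLoop]
    simp only [hf, dite_false, hr', hc2, Bool.false_eq_true, if_false]
    rw [hc1, hcn]
    exact ih'

-- Step 3 (proof-side): accumulator normalisation, monotonicity, and the relation between
-- one cLevel pass and B's (bMark, bExpand) stage pair.
theorem cLevel_next_append (graph : PySem.Dict Int (List Int)) (f : List Int) :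
    ∀ (levels : PySem.Dict Int Int) (next : List Int) (L : Int),
    cLevel graph f levels next L
      = ((cLevel graph f levels [] L).1,
         next ++ (cLevel graph f levels [] L).2.1,
         (cLevel graph f levels [] L).2.2) := by
  induction f with
  | nil => intro levels next L; simp [cLevel]
  | cons v vs ih =>
    intro levels next L
    by_cases hc : levels.contains v = true
    · simp only [cLevel, hc, if_true]
      exact ih levels next L
    · cases hg : graph.get? v with
      | none => simp [cLevel, hc, hg]
      | some ns =>
        simp only [cLevel, hc, hg, if_false, Bool.false_eq_true, List.nil_append]
        rw [ih (levels.insert v L) (next ++ ns.filter (fun n => !((levels.insert v L).contains n))) L,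
            ih (levels.insert v L) (ns.filter (fun n => !((levels.insert v L).contains n))) L]
        simp [List.append_assoc]

theorem bMark_fresh_append (graph : PySem.Dict Int (List Int)) (f : List Int) :
    ∀ (levels : PySem.Dict Int Int) (L : Int) (fresh : List (List Int)),
    bMark graph levels f L fresh
      = ((bMark graph levels f L []).1,
         fresh ++ (bMark graph levels f L []).2.1,
         (bMark graph levels f L []).2.2) := by
  induction f with
  | nil => intro levels L fresh; simp [bMark]
  | cons v vs ih =>
    intro levels L fresh
    by_cases hc : levels.contains v = true
    · simp only [bMark, hc, if_true]
      exact ih levels L fresh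
    · cases hg : graph.get? v with
      | none => simp [bMark, hc, hg]
      | some ns =>
        simp only [bMark, hc, hg, if_false, Bool.false_eq_true, List.nil_append]
        rw [ih (levels.insert v L) L (fresh ++ [ns]), ih (levels.insert v L) L [ns]]
        simp [List.append_assoc]

theorem cLevel_mono (graph : PySem.Dict Int (List Int)) (f : List Int) :
    ∀ (levels : PySem.Dict Int Int) (next : List Int) (L : Int) (x : Int),
    levels.contains x = true → (cLevel graph f levels next L).1.contains x = true := by
  induction f with
  | nil => intro levels next L x hx; exact hx
  | cons v vs ih =>
    intro levels next L x hx
    by_cases hc : levels.contains v = true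
    · simp only [cLevel, hc, if_true]
      exact ih levels next L x hx
    · simp only [cLevel, hc, if_false, Bool.false_eq_true]
      have hx' : (levels.insert v L).contains x = true := by
        rw [PySem.Dict.contains_insert, hx]
        simp
      cases hg : graph.get? v with
      | none => exact hx'
      | some ns =>
        exact ih (levels.insert v L)
          (next ++ ns.filter (fun n => !((levels.insert v L).contains n))) L x hx'

theorem cb_level (graph : PySem.Dict Int (List Int)) (f : List Int) :
    ∀ (levels : PySem.Dict Int Int) (L : Int),
    (bMark graph levels f L []).1 = (cLevel graph f levels [] L).1
      ∧ (bMark graph levels f L []).2.2 = (cLevel graph f levels [] L).2.2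
      ∧ ((bMark graph levels f L []).2.2 = false →
          bExpand (cLevel graph f levels [] L).1 (bMark graph levels f L []).2.1
            = (cLevel graph f levels [] L).2.1.filter
                (fun n => !((cLevel graph f levels [] L).1.contains n))) := by
  induction f with
  | nil =>
    intro levels L
    refine ⟨rfl, rfl, fun _ => rfl⟩
  | cons v vs ih =>
    intro levels L
    by_cases hc : levels.contains v = true
    · simp only [bMark, cLevel, hc, if_true]
      exact ih levels L
    · cases hg : graph.get? v with
      | none =>
        simp only [bMark, cLevel, hc, hg, if_false, Bool.false_eq_true]
        refine ⟨trivial, trivial, fun h => ?_⟩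
        exact absurd h (by decide)
      | some ns =>
        simp only [bMark, cLevel, hc, hg, if_false, Bool.false_eq_true, List.nil_append]
        rw [bMark_fresh_append graph vs (levels.insert v L) L [ns],
            cLevel_next_append graph vs (levels.insert v L)
              (ns.filter (fun n => !((levels.insert v L).contains n))) L]
        obtain ⟨ih1, ih2, ih3⟩ := ih (levels.insert v L) L
        refine ⟨ih1, ih2, ?_⟩
        intro hflag
        have h3 := ih3 hflag
        have hmono : ∀ x : Int, (levels.insert v L).contains x = true →
            (cLevel graph vs (levels.insert v L) [] L).1.contains x = true :=
          fun x hx => cLevel_mono graph vs (levels.insert v L) [] L x hx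
        have hfeq : ∀ (ms : List Int),
            ms.filter (fun n => !((cLevel graph vs (levels.insert v L) [] L).1.contains n))
              = (ms.filter (fun n => !((levels.insert v L).contains n))).filter
                  (fun n => !((cLevel graph vs (levels.insert v L) [] L).1.contains n)) := by
          intro ms
          induction ms with
          | nil => rfl
          | cons m ms ihm =>
            by_cases hb : (cLevel graph vs (levels.insert v L) [] L).1.contains m = true
            · cases hl' : (levels.insert v L).contains m
              · simp [List.filter_cons, hl', hb, ihm]
              · simp [List.filter_cons, hl', hb, ihm]
            · have hbf : (cLevel graph vs (levels.insert v L) [] L).1.contains m = false := by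
                simpa using hb
              have hl : (levels.insert v L).contains m = false := by
                cases hl' : (levels.insert v L).contains m
                · rfl
                · exact absurd (hmono m hl') (by simp [hbf])
              simp [List.filter_cons, hl, hbf, ihm]
        simp only [bExpand, List.singleton_append, List.flatMap_cons, List.filter_append]
        rw [← hfeq ns]
        have h3' := h3
        simp only [bExpand] at h3'
        rw [h3']

-- Step 4 (proof-side): pre-filtering a frontier by the current levels does not change cLoop.
theorem cLevel_prefilter (graph : PySem.Dict Int (List Int)) (f : List Int) :
    ∀ (levels0 levels : PySem.Dict Int Int) (next : List Int) (L : Int),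
    (∀ x : Int, levels0.contains x = true → levels.contains x = true) →
    cLevel graph (f.filter (fun v => !(levels0.contains v))) levels next L
      = cLevel graph f levels next L := by
  induction f with
  | nil => intro levels0 levels next L _; rfl
  | cons v vs ih =>
    intro levels0 levels next L h
    by_cases h0 : levels0.contains v = true
    · have hv : levels.contains v = true := h v h0
      simp only [List.filter_cons, h0, Bool.not_true, Bool.false_eq_true, if_false]
      rw [ih levels0 levels next L h]
      simp only [cLevel, hv, if_true]
    · have h0f : levels0.contains v = false := by simpa using h0
      simp only [List.filter_cons, h0f, Bool.not_false, if_true]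
      by_cases hc : levels.contains v = true
      · simp only [cLevel, hc, if_true]
        exact ih levels0 levels next L h
      · simp only [cLevel, hc, if_false, Bool.false_eq_true]
        cases hg : graph.get? v with
        | none => rfl
        | some ns =>
          have h' : ∀ x : Int, levels0.contains x = true → (levels.insert v L).contains x = true := by
            intro x hx
            rw [PySem.Dict.contains_insert, h x hx]
            simp
          exact ih levels0 (levels.insert v L)
            (next ++ ns.filter (fun n => !((levels.insert v L).contains n))) L h'

theorem cLevel_all_contained (graph : PySem.Dict Int (List Int)) (f : List Int) :
    ∀ (levels : PySem.Dict Int Int) (next : List Int) (L : Int),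
    (∀ v ∈ f, levels.contains v = true) →
    cLevel graph f levels next L = (levels, next, false) := by
  induction f with
  | nil => intro levels next L _; rfl
  | cons v vs ih =>
    intro levels next L h
    have hv : levels.contains v = true := h v (List.mem_cons_self ..)
    simp only [cLevel, hv, if_true]
    exact ih levels next L (fun w hw => h w (List.mem_cons_of_mem _ hw))

theorem cLoop_prefilter (graph : PySem.Dict Int (List Int)) (f : List Int)
    (X : PySem.Dict Int Int) (L : Int) :
    cLoop graph X (f.filter (fun v => !(X.contains v))) L = cLoop graph X f L := by
  by_cases hf : f = []
  · subst hf; rfl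
  · by_cases hff : f.filter (fun v => !(X.contains v)) = []
    · have hall : ∀ v ∈ f, X.contains v = true := by
        intro v hv
        cases hx : X.contains v with
        | true => rfl
        | false =>
          have : v ∈ f.filter (fun v => !(X.contains v)) :=
            List.mem_filter.mpr ⟨hv, by rw [hx]; rfl⟩
          rw [hff] at this
          cases this
      have h2 := cLevel_all_contained graph f X [] L hall
      have h3 : cLoop graph X ([] : List Int) (L + 1) = X := by rw [cLoop]; simp
      rw [hff, cLoop, cLoop]
      simp [hf, h2, h3]
    · conv_lhs => rw [cLoop]
      conv_rhs => rw [cLoop]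
      simp only [dif_neg hf, dif_neg hff]
      rw [cLevel_prefilter graph f X X [] L (fun _ hx => hx)]

-- Step 5 (proof-side): cLoop = bLoop.
theorem cb_loop (graph : PySem.Dict Int (List Int)) (levels : PySem.Dict Int Int)
    (frontier : List Int) (level : Int) :
    cLoop graph levels frontier level = bLoop graph levels frontier level := by
  induction levels, frontier, level using bLoop.induct graph with
  | case1 levels level => rw [cLoop, bLoop]; simp
  | case2 levels frontier level hf r hr =>
    obtain ⟨h1, h2, _⟩ := cb_level graph frontier levels level
    have hc2 : (cLevel graph frontier levels [] level).2.2 = true := by rw [← h2]; exact hr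
    rw [cLoop, bLoop]
    simp [hf, hc2, h1]
    intro hx
    have hrt : (bMark graph levels frontier level []).2.2 = true := hr
    rw [hx] at hrt
    exact Bool.noConfusion hrt
  | case3 levels frontier level hf r hr ih =>
    obtain ⟨h1, h2, h3⟩ := cb_level graph frontier levels level
    have hrf : (bMark graph levels frontier level []).2.2 = false := by simpa using hr
    have hc2 : (cLevel graph frontier levels [] level).2.2 = false := by rw [← h2]; exact hrf
    rw [cLoop, bLoop]
    simp only [hf, dite_false, hc2, hrf, Bool.false_eq_true, if_false]
    have e1 : cLoop graph (cLevel graph frontier levels [] level).1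
        (cLevel graph frontier levels [] level).2.1 (level + 1)
      = cLoop graph (cLevel graph frontier levels [] level).1
        ((cLevel graph frontier levels [] level).2.1.filter
          (fun n => !((cLevel graph frontier levels [] level).1.contains n))) (level + 1) :=
      (cLoop_prefilter graph (cLevel graph frontier levels [] level).2.1
        (cLevel graph frontier levels [] level).1 (level + 1)).symm
    rw [e1, ← h3 hrf, ← h1]
    exact ih

-- ===== VERDICT (by name: the statement is the Claim_ definition above) =====
theorem bfs_level_order_spec : Claim_equal_bfs_level_order := by
  intro graph start _ _
  unfold Spec_bfs_level_order bfs_level_order bfs_level_order_alt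
  have h1 := loop_sim (PySem.Dict.ofList graph) PySem.Set.empty PySem.Dict.empty [start] 0
  simp only [List.map_cons, List.map_nil] at h1
  rw [h1, sc_loop _ _ _ _ _ (by intro x; simp [PySem.Set.empty, PySem.Set.contains]),
    cb_loop]
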